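-- pv_equiv track=rewrite | github.com/xikong-mubai/yys-auto | yys_util.py | get_pixel_feature
-- ===== SOURCE A (Python) =====
-- def get_pixel_feature(pixel_list:list):
--     tmp_pixel = [0,0,0]
--     for i in pixel_list:
--         tmp_pixel[0] += i[0]
--         tmp_pixel[1] += i[1]
--         tmp_pixel[2] += i[2]
--     tmp_len = len(pixel_list)
--     tmp_pixel[0] //= tmp_len
--     tmp_pixel[1] //= tmp_len
--     tmp_pixel[2] //= tmp_len
--     return tmp_pixel
-- ===== SOURCE B (Python) =====
-- def get_pixel_feature(pixel_list: list):
--     n = len(pixel_list)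
--     return [sum(p[c] for p in pixel_list) // n for c in range(3)]
-- ===== Notes on version B (the rewrite author's own statement) =====
-- stated objective: simpler
-- what changed: Replaces the pixel-by-pixel loop with three mutating accumulators by a channel-by-channel comprehension: one sum pass per channel, floor-divided by the length.
-- outside the precondition, e.g. on get_pixel_feature([]): A raises ZeroDivisionError, B raises ZeroDivisionError
import Mathlib
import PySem

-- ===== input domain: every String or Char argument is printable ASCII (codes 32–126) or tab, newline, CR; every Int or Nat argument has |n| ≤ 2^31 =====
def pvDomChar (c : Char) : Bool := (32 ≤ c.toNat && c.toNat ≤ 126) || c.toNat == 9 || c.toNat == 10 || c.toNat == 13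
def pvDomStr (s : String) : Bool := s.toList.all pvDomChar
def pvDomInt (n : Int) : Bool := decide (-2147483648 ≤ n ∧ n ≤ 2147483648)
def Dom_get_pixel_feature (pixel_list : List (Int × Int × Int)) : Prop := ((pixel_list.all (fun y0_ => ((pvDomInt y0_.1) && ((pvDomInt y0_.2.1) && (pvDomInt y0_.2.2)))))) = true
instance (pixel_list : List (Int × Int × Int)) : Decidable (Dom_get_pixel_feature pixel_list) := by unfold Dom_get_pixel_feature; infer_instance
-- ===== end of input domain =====

-- B computes each channel's mean in its own pass (channel-by-channel comprehension) instead of A's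
-- single pixel-by-pixel loop with three mutating accumulators; objective: simpler.

-- ===== PORT A =====
-- one pass over the pixels, accumulating the three channel sums together, then three floor-divisions
def get_pixel_feature (pixel_list : List (Int × Int × Int)) : List Int :=
  let tmp := pixel_list.foldl
    (fun (tp : Int × Int × Int) i => (tp.1 + i.1, tp.2.1 + i.2.1, tp.2.2 + i.2.2)) (0, 0, 0)
  let n : Int := pixel_list.length
  [PySem.Int.floordiv tmp.1 n, PySem.Int.floordiv tmp.2.1 n, PySem.Int.floordiv tmp.2.2 n]

-- ===== PORT B =====
-- p[c] for a fixed triple: channel selector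
def pvChan (c : Nat) (p : Int × Int × Int) : Int :=
  if c = 0 then p.1 else if c = 1 then p.2.1 else p.2.2

-- [sum(p[c] for p in pixel_list) // n for c in range(3)]
def get_pixel_feature_alt (pixel_list : List (Int × Int × Int)) : List Int :=
  let n : Int := pixel_list.length
  (List.range 3).map (fun c => PySem.Int.floordiv ((pixel_list.map (pvChan c)).sum) n)

-- ===== PRECONDITION & SPEC =====
-- A raises ZeroDivisionError on the empty list; Pre_ excludes it (B raises there too).
def Pre_get_pixel_feature (pixel_list : List (Int × Int × Int)) : Prop := pixel_list ≠ []
instance (pixel_list : List (Int × Int × Int)) : Decidable (Pre_get_pixel_feature pixel_list) := by unfold Pre_get_pixel_feature; infer_instance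

def pvWitness_get_pixel_feature : (List (Int × Int × Int)) := [(1, 2, 3), (4, 5, 6)]

def Spec_get_pixel_feature (pixel_list : List (Int × Int × Int)) (out : List Int) : Prop := out = get_pixel_feature_alt pixel_list
instance (pixel_list : List (Int × Int × Int)) (out : List Int) : Decidable (Spec_get_pixel_feature pixel_list out) := by unfold Spec_get_pixel_feature; infer_instance

-- ===== CLAIM (what is proved, stated in full; the proofs are below) =====
def Claim_equal_get_pixel_feature : Prop := ∀ (pixel_list : List (Int × Int × Int)), Dom_get_pixel_feature pixel_list → Pre_get_pixel_feature pixel_list → Spec_get_pixel_feature pixel_list (get_pixel_feature pixel_list)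

-- ===== LEMMAS AND PROOFS =====

-- A's combined fold computes exactly the three per-channel sums.
theorem pv_foldl_sums (l : List (Int × Int × Int)) (a b c : Int) :
    l.foldl (fun (tp : Int × Int × Int) i => (tp.1 + i.1, tp.2.1 + i.2.1, tp.2.2 + i.2.2)) (a, b, c)
      = (a + (l.map (·.1)).sum, b + (l.map (·.2.1)).sum, c + (l.map (·.2.2)).sum) := by
  induction l generalizing a b c with
  | nil => simp
  | cons h t ih => simp [List.foldl_cons, ih]; refine ⟨by ring, by ring, by ring⟩

-- ===== VERDICT (by name: the statement is the Claim_ definition above) =====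
theorem get_pixel_feature_spec : Claim_equal_get_pixel_feature := by
  intro pixel_list _ _
  unfold Spec_get_pixel_feature get_pixel_feature get_pixel_feature_alt
  simp [pv_foldl_sums, List.range_succ]
  exact ⟨rfl, rfl, rfl⟩
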